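-- pv_equiv track=rewrite | github.com/SoratoGroup/avremi-voice | espeak_respell.py | _replace_kh
-- ===== SOURCE A (Python) =====
-- def _replace_kh(word: str) -> str:
--     """Replace kh→ch, but only after a vowel.
--
--     German word-initial "ch" before a/o/u is pronounced [ʃ] (French loanword
--     rule: "Chance", "Charme"). After a vowel, "ch" correctly gives [x] (ach-Laut)
--     or [ç] (ich-Laut). At word start, we leave "kh" as-is — espeak produces
--     aspirated [kʰ] which is closer to [x] than [ʃ] is.
--     """
--     if "kh" not in word:
--         return word
--
--     result = []
--     i = 0
--     while i < len(word):
--         if word[i:i+2] == "kh":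
--             # Check if preceded by a vowel
--             if i > 0 and result and result[-1] in "aeiou":
--                 result.append("ch")
--             else:
--                 result.append("kh")
--             i += 2
--         else:
--             result.append(word[i])
--             i += 1
--     return "".join(result)
-- ===== SOURCE B (Python) =====
-- def _replace_kh(word: str) -> str:
--     parts = word.split("kh")
--     pieces = [parts[0]]
--     for prev, nxt in zip(parts, parts[1:]):
--         pieces.append("ch" if prev and prev[-1] in "aeiou" else "kh")
--         pieces.append(nxt)
--     return "".join(pieces)
-- ===== Notes on version B (the rewrite author's own statement) =====
-- stated objective: idiomatic
-- what changed: A's index-driven while loop with slicing and a result-pieces list is replaced by a single str.split on 'kh' followed by re-joining the parts, choosing 'ch' or 'kh' at each boundary from the last character of the preceding part.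
import Mathlib
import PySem

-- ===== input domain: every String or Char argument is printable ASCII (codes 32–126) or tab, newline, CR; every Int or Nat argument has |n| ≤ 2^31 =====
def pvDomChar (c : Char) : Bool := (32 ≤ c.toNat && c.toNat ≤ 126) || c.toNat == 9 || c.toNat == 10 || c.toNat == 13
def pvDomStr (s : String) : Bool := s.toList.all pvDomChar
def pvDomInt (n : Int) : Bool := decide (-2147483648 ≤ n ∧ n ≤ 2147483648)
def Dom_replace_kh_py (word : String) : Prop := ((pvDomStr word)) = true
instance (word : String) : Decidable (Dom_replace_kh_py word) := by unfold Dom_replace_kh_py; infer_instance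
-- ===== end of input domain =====

-- B replaces A's index-by-index while loop by splitting the word on "kh" once and
-- re-joining the parts with "ch"/"kh" chosen from each left part's last character (objective: idiomatic).

-- ===== PORT A =====
-- the while loop: i is the index, result the list of appended pieces (each a Python str = List Char)
def replaceKhLoopA (cs : List Char) (i : Nat) (result : List (List Char)) : List (List Char) :=
  if h : i < cs.length then
    if PySem.List.slice cs (some (i : Int)) (some ((i : Int) + 2)) = ['k', 'h'] then
      if decide (0 < i) && !result.isEmpty
          && PySem.Chars.isIn (result.getLastD []) ['a', 'e', 'i', 'o', 'u'] then
        replaceKhLoopA cs (i + 2) (result ++ [['c', 'h']])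
      else
        replaceKhLoopA cs (i + 2) (result ++ [['k', 'h']])
    else
      replaceKhLoopA cs (i + 1) (result ++ [[cs[i]]])
  else
    result
termination_by cs.length - i

def replace_kh_py (word : String) : String :=
  if PySem.Str.isIn "kh" word = false then word
  else String.ofList (PySem.Chars.join [] (replaceKhLoopA word.toList 0 []))

-- ===== PORT B =====
-- "ch" if prev and prev[-1] in "aeiou" else "kh"
def khDec (prev : List Char) : List Char :=
  if !prev.isEmpty && PySem.Chars.isIn [prev.getLastD ' '] ['a', 'e', 'i', 'o', 'u'] then
    ['c', 'h']
  else
    ['k', 'h']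

def replace_kh_py_alt (word : String) : String :=
  let parts := PySem.Chars.splitOn word.toList ['k', 'h']
  -- pieces = [parts[0]]; for prev, nxt in zip(parts, parts[1:]): append decision, append nxt
  -- (str.split always returns a non-empty list, so parts[0] never raises)
  let pieces := [parts.headD []]
    ++ ((parts.zip parts.tail).foldl (fun acc p => acc ++ [khDec p.1, p.2]) [])
  String.ofList (PySem.Chars.join [] pieces)

-- ===== PRECONDITION & SPEC =====
def Spec_replace_kh_py (word : String) (out : String) : Prop := out = replace_kh_py_alt word
instance (word : String) (out : String) : Decidable (Spec_replace_kh_py word out) := by unfold Spec_replace_kh_py; infer_instance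

-- ===== CLAIM (what is proved, stated in full; the proofs are below) =====
def Claim_equal_replace_kh_py : Prop := ∀ (word : String), Dom_replace_kh_py word → Spec_replace_kh_py word (replace_kh_py word)

-- ===== LEMMAS AND PROOFS =====

def isVow (c : Char) : Bool := decide (c ∈ (['a', 'e', 'i', 'o', 'u'] : List Char))

-- reference scan: flag = "the previous original character is a vowel"
def scanA (v : Bool) (l : List Char) : List Char :=
  match l with
  | [] => []
  | c :: rest =>
    if ['k', 'h'].isPrefixOf (c :: rest) then
      (if v then ['c', 'h'] else ['k', 'h']) ++ scanA false (rest.drop 1)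
    else
      c :: scanA (isVow c) rest
termination_by l.length
decreasing_by all_goals simp

-- structural twin of PySem.Chars.splitOn.go for sep = "kh"
def mysplitKh (cur : List Char) (l : List Char) : List (List Char) :=
  match l with
  | [] => [cur]
  | c :: rest =>
    if ['k', 'h'].isPrefixOf (c :: rest) then
      cur :: mysplitKh [] (rest.drop 1)
    else
      mysplitKh (cur ++ [c]) rest
termination_by l.length
decreasing_by all_goals simp

-- B's re-join, recursively
def glue (parts : List (List Char)) : List Char :=
  match parts with
  | [] => []
  | [p] => p
  | p :: q :: rest => p ++ khDec p ++ glue (q :: rest)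

def lastV (cur : List Char) : Bool := (cur.getLast?.map isVow).getD false

-- prevV cs i : the A-loop's vowel condition expressed on the original string
def prevV (cs : List Char) (i : Nat) : Bool :=
  if i = 0 then false else ((cs[i - 1]?).map isVow).getD false

theorem join_nil_flatten (l : List (List Char)) : PySem.Chars.join [] l = l.flatten := by
  induction l with
  | nil => rfl
  | cons p t ih =>
    cases t with
    | nil => simp [PySem.Chars.join, List.intercalate]
    | cons q r =>
      simp only [PySem.Chars.join, List.intercalate] at *
      simp [List.intersperse] at *
      simpa using ih

theorem take_two_eq_iff (a b : Char) (l : List Char) : l.take 2 = [a, b] ↔ [a, b] <+: l := by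
  constructor
  · intro h; exact ⟨l.drop 2, by rw [← h]; simp⟩
  · rintro ⟨t, rfl⟩; simp

theorem isIn_singleton (c : Char) (l : List Char) :
    PySem.Chars.isIn [c] l = decide (c ∈ l) := by
  by_cases h : c ∈ l
  · simp [h]
    rw [PySem.Chars.isIn_iff_infix]
    exact (List.singleton_infix_iff c l).2 h
  · simp [h]
    rw [PySem.Chars.isIn_eq_false_iff]
    intro hin
    exact h ((List.singleton_infix_iff c l).1 hin)

theorem khDec_eq (cur : List Char) :
    khDec cur = if lastV cur then ['c', 'h'] else ['k', 'h'] := by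
  cases h : cur.getLast? with
  | none =>
    have : cur = [] := List.getLast?_eq_none_iff.1 h
    subst this; simp [khDec, lastV]
  | some c =>
    have hne : cur ≠ [] := by
      intro hnil; subst hnil; simp at h
    have hd : cur.getLastD ' ' = c := by
      simp [List.getLastD_eq_getLast?, h]
    rw [khDec, hd]
    simp [lastV, h, hne, isIn_singleton, isVow]
    

-- scanA equations
theorem scanA_nil (v : Bool) : scanA v [] = [] := by rw [scanA]

theorem scanA_kh (v : Bool) (t : List Char) :
    scanA v ('k' :: 'h' :: t) = (if v then ['c', 'h'] else ['k', 'h']) ++ scanA false t := by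
  rw [scanA]; simp [List.isPrefixOf]

theorem scanA_cons (v : Bool) (c : Char) (rest : List Char)
    (h : ¬ (['k', 'h'].isPrefixOf (c :: rest) = true)) :
    scanA v (c :: rest) = c :: scanA (isVow c) rest := by
  rw [scanA]; simp [h]

-- mysplitKh equations
theorem mysplitKh_kh (cur t : List Char) :
    mysplitKh cur ('k' :: 'h' :: t) = cur :: mysplitKh [] t := by
  rw [mysplitKh]; simp [List.isPrefixOf]

theorem mysplitKh_cons (cur : List Char) (c : Char) (rest : List Char)
    (h : ¬ (['k', 'h'].isPrefixOf (c :: rest) = true)) :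
    mysplitKh cur (c :: rest) = mysplitKh (cur ++ [c]) rest := by
  rw [mysplitKh]; simp [h]

theorem scanA_of_not_infix (v : Bool) (l : List Char)
    (h : ¬ (['k', 'h'] <:+: l)) : scanA v l = l := by
  induction l generalizing v with
  | nil => exact scanA_nil v
  | cons c rest ih =>
    have hp : ¬ (['k', 'h'].isPrefixOf (c :: rest) = true) := by
      intro hpre
      exact h (List.IsPrefix.isInfix (List.isPrefixOf_iff_prefix.1 hpre))
    rw [scanA_cons v c rest hp,
        ih _ (fun hin => h (hin.trans (List.suffix_cons c rest).isInfix))]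

-- === A side: the loop computes scanA ===

theorem loopA_spec (cs : List Char) (i : Nat) (result : List (List Char))
    (hinv : (decide (0 < i) && !result.isEmpty
        && PySem.Chars.isIn (result.getLastD []) ['a', 'e', 'i', 'o', 'u']) = prevV cs i) :
    (replaceKhLoopA cs i result).flatten
      = result.flatten ++ scanA (prevV cs i) (cs.drop i) := by
  induction hn : cs.length - i using Nat.strong_induction_on generalizing i result with
  | _ n ih =>
  subst hn
  rw [replaceKhLoopA]
  by_cases h : i < cs.length
  · simp only [h, dif_pos]
    have hsl : PySem.List.slice cs (some (i : Int)) (some ((i : Int) + 2)) = (cs.drop i).take 2 := by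
      have := PySem.List.slice_natCast_add cs i 2
      simpa using this
    by_cases hkh : (cs.drop i).take 2 = ['k', 'h']
    · -- a "kh" match at i
      obtain ⟨t, ht⟩ := (take_two_eq_iff _ _ _).1 hkh
      have hlen2 : i + 2 ≤ cs.length := by
        have := congrArg List.length ht
        simp at this; omega
      have hdrop2 : cs.drop (i + 2) = t := by
        have h2 : (cs.drop i).drop 2 = t := by rw [← ht]; simp
        rw [List.drop_drop] at h2
        exact h2
      have hcons2 : cs.drop i = 'k' :: 'h' :: cs.drop (i + 2) := by
        rw [hdrop2, ← ht]; rfl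
      have hscan : scanA (prevV cs i) (cs.drop i)
          = (if prevV cs i then ['c', 'h'] else ['k', 'h']) ++ scanA false (cs.drop (i + 2)) := by
        rw [hcons2, scanA_kh]
      have hprev2 : prevV cs (i + 2) = false := by
        have hh : cs[i + 1]? = some 'h' := by
          have h1 : (cs.drop i)[1]? = some 'h' := by rw [hcons2]; rfl
          rw [List.getElem?_drop] at h1
          simpa [Nat.add_comm] using h1
        unfold prevV
        simp [hh, isVow]
      have hinv2 : ∀ piece : List Char, piece = ['c', 'h'] ∨ piece = ['k', 'h'] →
          (decide (0 < i + 2) && !(result ++ [piece]).isEmpty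
            && PySem.Chars.isIn ((result ++ [piece]).getLastD []) ['a', 'e', 'i', 'o', 'u'])
            = prevV cs (i + 2) := by
        intro piece hp
        rw [hprev2]
        rcases hp with rfl | rfl <;> simp <;> decide
      rw [hsl, if_pos hkh]
      by_cases hv : prevV cs i = true
      · rw [hinv.trans hv, if_pos rfl]
        rw [ih (cs.length - (i + 2)) (by omega) (i + 2) _ (hinv2 _ (Or.inl rfl)) rfl]
        rw [hscan, hprev2, hv]
        simp
      · rw [Bool.not_eq_true] at hv
        rw [hinv.trans hv, if_neg (by simp)]
        rw [ih (cs.length - (i + 2)) (by omega) (i + 2) _ (hinv2 _ (Or.inr rfl)) rfl]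
        rw [hscan, hprev2, hv]
        simp
    · -- no match: copy one character
      have hcons : cs.drop i = cs[i] :: cs.drop (i + 1) := List.drop_eq_getElem_cons h
      have hnp : ¬ (['k', 'h'].isPrefixOf (cs.drop i) = true) := by
        intro hpre
        exact hkh ((take_two_eq_iff _ _ _).2 (List.isPrefixOf_iff_prefix.1 hpre))
      have hscan : scanA (prevV cs i) (cs.drop i)
          = cs[i] :: scanA (isVow cs[i]) (cs.drop (i + 1)) := by
        rw [hcons] at hnp ⊢
        exact scanA_cons _ _ _ hnp
      have hprev1 : prevV cs (i + 1) = isVow cs[i] := by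
        unfold prevV
        simp [h]
      have hinv1 : (decide (0 < i + 1) && !(result ++ [[cs[i]]]).isEmpty
          && PySem.Chars.isIn ((result ++ [[cs[i]]]).getLastD []) ['a', 'e', 'i', 'o', 'u'])
          = prevV cs (i + 1) := by
        rw [hprev1]
        simp [isIn_singleton, isVow]
      rw [hsl, if_neg hkh]
      rw [ih (cs.length - (i + 1)) (by omega) (i + 1) _ hinv1 rfl]
      rw [hscan, hprev1]
      simp
  · rw [dif_neg h]
    have hnil : cs.drop i = [] := List.drop_eq_nil_of_le (by omega)
    rw [hnil, scanA_nil]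
    simp

-- === B side: splitOn is mysplitKh ===

theorem go_spec (fuel : Nat) (l cur : List Char) (acc : List (List Char))
    (hf : l.length < fuel) :
    PySem.Chars.splitOn.go ['k', 'h'] fuel l cur acc
      = acc.reverse ++ mysplitKh cur.reverse l := by
  induction fuel generalizing l cur acc with
  | zero => omega
  | succ fuel ih =>
    cases l with
    | nil =>
      rw [PySem.Chars.splitOn.go, mysplitKh]
      simp
      omega
    | cons c rest =>
      rw [PySem.Chars.splitOn.go, mysplitKh]
      by_cases hpre : ['k', 'h'].isPrefixOf (c :: rest) = true
      · simp only [hpre, if_true]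
        rw [ih (List.drop (['k', 'h'] : List Char).length (c :: rest)) [] (cur.reverse :: acc)
            (by simp at hf ⊢; omega)]
        simp
      · simp only [hpre, Bool.false_eq_true, if_false]
        rw [ih rest (c :: cur) acc (by simp at hf; omega)]
        simp

theorem splitOn_eq_mysplitKh (cs : List Char) :
    PySem.Chars.splitOn cs ['k', 'h'] = mysplitKh [] cs := by
  unfold PySem.Chars.splitOn
  rw [go_spec _ _ _ _ (by omega)]
  simp

theorem mysplitKh_ne_nil (cur l : List Char) : mysplitKh cur l ≠ [] := by
  cases l with
  | nil => rw [mysplitKh]; simp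
  | cons c rest =>
    rw [mysplitKh]
    by_cases hpre : ['k', 'h'].isPrefixOf (c :: rest) = true
    · simp [hpre]
    · rw [if_neg hpre]
      exact mysplitKh_ne_nil (cur ++ [c]) rest
termination_by l.length
decreasing_by all_goals simp

theorem glue_mysplitKh (l cur : List Char) :
    glue (mysplitKh cur l) = cur ++ scanA (lastV cur) l := by
  cases l with
  | nil => rw [mysplitKh, scanA_nil]; simp [glue]
  | cons c rest =>
    by_cases hpre : ['k', 'h'].isPrefixOf (c :: rest) = true
    · obtain ⟨t, ht⟩ : ∃ t, c :: rest = 'k' :: 'h' :: t := by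
        rw [List.isPrefixOf_iff_prefix] at hpre
        obtain ⟨t, ht⟩ := hpre
        exact ⟨t, ht.symm⟩
      rw [ht, mysplitKh_kh, scanA_kh]
      obtain ⟨q, r, hqr⟩ : ∃ q r, mysplitKh [] t = q :: r := by
        cases hc : mysplitKh ([] : List Char) t with
        | nil => exact absurd hc (mysplitKh_ne_nil _ _)
        | cons q r => exact ⟨q, r, rfl⟩
      have hglue : glue (cur :: mysplitKh [] t) = cur ++ khDec cur ++ glue (mysplitKh [] t) := by
        rw [hqr]; rfl
      have hlt : t.length < (c :: rest).length := by
        have := congrArg List.length ht; simp at this; simp; omega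
      rw [hglue, glue_mysplitKh t []]
      rw [khDec_eq]
      simp [lastV]
    · rw [mysplitKh_cons _ _ _ hpre, scanA_cons _ _ _ hpre]
      rw [glue_mysplitKh rest (cur ++ [c])]
      have hl : lastV (cur ++ [c]) = isVow c := by simp [lastV]
      rw [hl]
      simp
termination_by l.length
decreasing_by all_goals simp [*]

-- === B's fold is glue ===

theorem foldl_app2 (l : List (List Char × List Char)) (init : List (List Char)) :
    l.foldl (fun acc x => acc ++ [khDec x.1, x.2]) init
      = init ++ l.foldl (fun acc x => acc ++ [khDec x.1, x.2]) [] := by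
  induction l generalizing init with
  | nil => simp
  | cons a b ih =>
    simp only [List.foldl_cons]
    rw [ih (init ++ [khDec a.1, a.2]), ih ([] ++ [khDec a.1, a.2])]
    simp

theorem fold_pairs_glue (p : List Char) (t : List (List Char)) :
    ([p] ++ ((p :: t).zip t).foldl (fun acc x => acc ++ [khDec x.1, x.2]) []).flatten
      = glue (p :: t) := by
  induction t generalizing p with
  | nil => simp [glue]
  | cons q r ih =>
    have hz : ((p :: q :: r).zip (q :: r)) = (p, q) :: ((q :: r).zip r) := rfl
    rw [hz]
    simp only [List.foldl_cons]
    rw [foldl_app2]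
    have hih := ih q
    simp only [List.flatten, List.cons_append, List.nil_append] at hih ⊢
    rw [show glue (p :: q :: r) = p ++ khDec p ++ glue (q :: r) from rfl, ← hih]
    simp

-- === assembly ===

theorem alt_toList (word : String) :
    replace_kh_py_alt word = String.ofList (scanA false word.toList) := by
  unfold replace_kh_py_alt
  simp only [splitOn_eq_mysplitKh, join_nil_flatten]
  obtain ⟨q, r, hqr⟩ : ∃ q r, mysplitKh [] word.toList = q :: r := by
    cases hc : mysplitKh ([] : List Char) word.toList with
    | nil => exact absurd hc (mysplitKh_ne_nil _ _)
    | cons q r => exact ⟨q, r, rfl⟩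
  rw [hqr]
  simp only [List.headD_cons, List.tail_cons]
  rw [fold_pairs_glue, ← hqr, glue_mysplitKh]
  simp [lastV]

-- ===== VERDICT (by name: the statement is the Claim_ definition above) =====
theorem replace_kh_py_spec : Claim_equal_replace_kh_py := by
  intro word _
  unfold Spec_replace_kh_py
  rw [alt_toList]
  unfold replace_kh_py
  by_cases hin : PySem.Str.isIn "kh" word = false
  · rw [if_pos hin]
    have hni : ¬ (['k', 'h'] <:+: word.toList) := by
      intro hi
      have hkh : PySem.Str.isIn "kh" word = true :=
        (PySem.Str.isIn_iff_infix "kh" word).mpr (by simpa using hi)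
      rw [hkh] at hin
      cases hin
    rw [scanA_of_not_infix _ _ hni, String.ofList_toList]
  · rw [if_neg hin]
    rw [join_nil_flatten]
    have h0 : prevV word.toList 0 = false := by simp [prevV]
    have := loopA_spec word.toList 0 [] (by simp [prevV])
    rw [h0] at this
    simp at this
    rw [this]
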